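-- pv_equiv track=rewrite | github.com/rojovox/GB | Osnovi_yazika_python/Lesson_2/Vovod_Boris_task_2_3.py | number_converter
-- ===== SOURCE A (Python) =====
-- def number_converter(temp):
--     for i1, value1 in enumerate(temp, 0):
--         # Дополнение однозначного числа до двухзначного путем добавления нуля и 1 стадия добавления кавычек
--         if temp[i1][0].isdigit():
--             if len(temp[i1]) < 2:
--                 temp[i1] = '0' + temp[i1][0]
--             temp.insert(i1 + 1, '"')
--         # Дополнение однозначного числа до двухзначного путем добавления нуля
--         # при условии, что перед числом стоит плюс, либо минус и 1 стадия добавления кавычек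
--         if temp[i1][0] == '+' or temp[i1][0] == '-':
--             if len(temp[i1]) == 2:
--                 temp[i1] = temp[i1][0] + '0' + temp[i1][1]
--             temp.insert(i1 + 1, '"')
--     temp.reverse()
--     return temp
-- ===== SOURCE B (Python) =====
-- # B: single reverse-order pass building the output directly (quote emitted before
-- # its element), then written back with temp[:] so the argument is mutated like A.
-- def number_converter(temp):
--     out = []
--     for x in reversed(temp):
--         c = x[0]
--         if c.isdigit():
--             out.append('"')
--             out.append('0' + c if len(x) == 1 else x)
--         elif c == '+' or c == '-':
--             out.append('"')
--             out.append(c + '0' + x[1] if len(x) == 2 else x)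
--         else:
--             out.append(x)
--     temp[:] = out
--     return temp
-- ===== Notes on version B (the rewrite author's own statement) =====
-- stated objective: simpler
-- what changed: A enumerates over the list while inserting '"' markers into it mid-iteration and reverses at the end; B makes one pass over the input in reverse order, emitting each quote before its (possibly padded) element into a fresh list, then writes it back with temp[:] so the argument is mutated like A.
import Mathlib
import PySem

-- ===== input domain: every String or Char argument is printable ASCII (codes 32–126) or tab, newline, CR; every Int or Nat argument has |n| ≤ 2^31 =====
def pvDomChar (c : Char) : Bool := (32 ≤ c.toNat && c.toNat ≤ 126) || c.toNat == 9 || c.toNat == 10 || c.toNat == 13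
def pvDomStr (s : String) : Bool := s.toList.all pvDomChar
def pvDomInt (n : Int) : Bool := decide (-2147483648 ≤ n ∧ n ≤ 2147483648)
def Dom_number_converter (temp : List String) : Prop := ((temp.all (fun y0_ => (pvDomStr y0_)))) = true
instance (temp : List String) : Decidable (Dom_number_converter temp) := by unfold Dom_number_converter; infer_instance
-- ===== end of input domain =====

-- ===== PORT A =====
-- B replaces A's insert-while-enumerating scan by a single reverse-order pass that emits
-- each quote before its element; both Pythons mutate the argument in place (A by inserts,
-- B by temp[:] = out): the equivalence proved here is about the return value.

-- A-side helper: the body of one iteration of A's enumerate loop on element x: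
-- (the possibly padded element, the '"' strings A inserts right after it).
def aStep (x : String) : String × List String :=
  match PySem.Str.pyGet? x 0 with
  | none => (x, [])   -- Python raises IndexError on an empty element (excluded by Pre_)
  | some c =>
    -- if temp[i1][0].isdigit(): pad a one-char number with '0', insert '"'
    let p1 : String × List String :=
      if PySem.Chars.isdigit c then
        ((if PySem.Str.len x < 2 then String.ofList ['0', c] else x), ["\""])
      else (x, [])
    -- if temp[i1][0] == '+' or temp[i1][0] == '-': (re-reads the possibly padded element)
    match PySem.Str.pyGet? p1.1 0 with
    | none => p1   -- unreachable when x is nonempty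
    | some c2 =>
      if c2 = '+' ∨ c2 = '-' then
        ((if PySem.Str.len p1.1 = 2
            then String.ofList [c2, '0', (PySem.Str.pyGet? p1.1 1).getD ' ']  -- x1[1] exists since len = 2
            else p1.1), "\"" :: p1.2)   -- this insert at i1+1 lands before the first one
      else p1

-- does A's loop body fire on this element? (only for the termination measure of aLoop)
def aActive (x : String) : Bool :=
  match PySem.Str.pyGet? x 0 with
  | none => false
  | some c => PySem.Chars.isdigit c || c = '+' || c = '-'

-- characterisation of aStep, case by case (cited by the termination proof of aLoop)
theorem isdigit_not_sign (c : Char) (h : PySem.Chars.isdigit c = true) : ¬(c = '+' ∨ c = '-') := by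
  simp [PySem.Chars.isdigit] at h; rintro (rfl | rfl) <;> simp_all

theorem pyGet?_zero_cons (x : String) (c : Char) (cs : List Char) (hcs : x.toList = c :: cs) :
    PySem.Str.pyGet? x 0 = some c := by
  simp [PySem.Str.pyGet?, PySem.Chars.pyGet?, PySem.List.pyGet?, PySem.List.pyIdx?, hcs]

theorem pyGet?_zero_ofList2 (a c : Char) : PySem.Str.pyGet? (String.ofList [a, c]) 0 = some a := by
  simp [PySem.Str.pyGet?, PySem.Chars.pyGet?, PySem.List.pyGet?, PySem.List.pyIdx?]

theorem pyGet?_zero_nil (x : String) (hx : x.toList = []) : PySem.Str.pyGet? x 0 = none := by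
  simp [PySem.Str.pyGet?, PySem.Chars.pyGet?, PySem.List.pyGet?, PySem.List.pyIdx?, hx]

theorem aStep_nil (x : String) (hx : x.toList = []) : aStep x = (x, []) := by
  unfold aStep
  rw [pyGet?_zero_nil x hx]

theorem aStep_digit_pad (x : String) (c : Char) (h0 : PySem.Str.pyGet? x 0 = some c)
    (hd : PySem.Chars.isdigit c = true) (hl : PySem.Str.len x < 2) :
    aStep x = (String.ofList ['0', c], ["\""]) := by
  unfold aStep
  rw [h0]
  simp only [hd, if_true, if_pos hl, pyGet?_zero_ofList2]
  simp

theorem aStep_digit (x : String) (c : Char) (h0 : PySem.Str.pyGet? x 0 = some c)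
    (hd : PySem.Chars.isdigit c = true) (hl : ¬ PySem.Str.len x < 2) :
    aStep x = (x, ["\""]) := by
  unfold aStep
  rw [h0]
  simp only [hd, if_true, if_neg hl, h0]
  simp [isdigit_not_sign c hd]

theorem aStep_sign (x : String) (c : Char) (h0 : PySem.Str.pyGet? x 0 = some c)
    (hd : PySem.Chars.isdigit c = false) (hs : c = '+' ∨ c = '-') :
    aStep x = ((if PySem.Str.len x = 2
                  then String.ofList [c, '0', (PySem.Str.pyGet? x 1).getD ' ']
                  else x), ["\""]) := by
  unfold aStep
  rw [h0]
  simp only [hd, Bool.false_eq_true, if_false, h0, if_pos hs]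

theorem aStep_other (x : String) (c : Char) (h0 : PySem.Str.pyGet? x 0 = some c)
    (hd : PySem.Chars.isdigit c = false) (hs : ¬(c = '+' ∨ c = '-')) :
    aStep x = (x, []) := by
  unfold aStep
  rw [h0]
  simp only [hd, Bool.false_eq_true, if_false, h0, if_neg hs]

-- every inserted string is '"', and nothing is inserted for an inactive element
theorem aStep_cases (x : String) :
    ((aStep x).2 = [] ∧ aActive x = false) ∨ ((aStep x).2 = ["\""] ∧ aActive x = true) := by
  cases hcs : x.toList with
  | nil => left; rw [aStep_nil x hcs]; simp [aActive, PySem.List.pyGet?, PySem.List.pyIdx?, hcs]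
  | cons c cs =>
    have h0 := pyGet?_zero_cons x c cs hcs
    have h0' : PySem.List.pyGet? x.toList 0 = some c := by
      simpa [PySem.Str.pyGet?] using h0
    by_cases hd : PySem.Chars.isdigit c = true
    · right
      by_cases hl : PySem.Str.len x < 2
      · rw [aStep_digit_pad x c h0 hd hl]; simp [aActive, h0', hd]
      · rw [aStep_digit x c h0 hd hl]; simp [aActive, h0', hd]
    · by_cases hs : c = '+' ∨ c = '-'
      · right; rw [aStep_sign x c h0 (by simp_all) hs]
        rcases hs with rfl | rfl <;> simp [aActive, h0']
      · left; rw [aStep_other x c h0 (by simp_all) hs]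
        push Not at hs
        simp [aActive, h0', hd, hs.1, hs.2]

theorem aStep_measure (x : String) (rs : List String) :
    ((aStep x).2 ++ rs).countP aActive < (x :: rs).countP aActive ∨
    (((aStep x).2 ++ rs).countP aActive = (x :: rs).countP aActive ∧
      ((aStep x).2 ++ rs).length < (x :: rs).length) := by
  rcases aStep_cases x with ⟨hq, ha⟩ | ⟨hq, ha⟩
  · right; simp [hq, ha]
  · left; simp [hq, ha, aActive_quote]
where aActive_quote : aActive "\"" = false := by decide

-- A's loop: enumerate over the list while inserting '"' right after the current element;
-- acc is the already-visited prefix, the second argument the remaining suffix of temp.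
def aLoop (acc : List String) (rest : List String) : List String :=
  match rest with
  | [] => acc
  | x :: rs => aLoop (acc ++ [(aStep x).1]) ((aStep x).2 ++ rs)
termination_by ((rest.countP aActive, rest.length) : Nat ×ₗ Nat)
decreasing_by
  rcases aStep_measure x rs with h | ⟨h1, h2⟩
  · exact Prod.Lex.left _ _ h
  · exact h1 ▸ Prod.Lex.right _ h2

def number_converter (temp : List String) : List String :=
  (aLoop [] temp).reverse   -- temp.reverse(); return temp

-- ===== PORT B =====
-- B-side helper: the output fragment Source B appends for one element x (quote first).
def bItem (x : String) : List String :=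
  match PySem.Str.pyGet? x 0 with
  | none => [x]   -- Python raises IndexError on an empty element (excluded by Pre_)
  | some c =>
    if PySem.Chars.isdigit c then
      ["\"", if PySem.Str.len x = 1 then String.ofList ['0', c] else x]
    else if c = '+' ∨ c = '-' then
      ["\"", if PySem.Str.len x = 2 then String.ofList [c, '0', (PySem.Str.pyGet? x 1).getD ' '] else x]
    else [x]

def number_converter_alt (temp : List String) : List String :=
  temp.reverse.foldl (fun out x => out ++ bItem x) []

-- ===== PRECONDITION & SPEC =====
-- Pre_ excludes lists containing an empty string, on which A raises IndexError at temp[i1][0].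
def Pre_number_converter (temp : List String) : Prop := ∀ s ∈ temp, s ≠ ""
instance (temp : List String) : Decidable (Pre_number_converter temp) := by
  unfold Pre_number_converter; infer_instance

def pvWitness_number_converter : List String := ["5", "+7", "-12", "ab", "\""]

def Spec_number_converter (temp : List String) (out : List String) : Prop := out = number_converter_alt temp
instance (temp : List String) (out : List String) : Decidable (Spec_number_converter temp out) := by unfold Spec_number_converter; infer_instance

-- ===== CLAIM (what is proved, stated in full; the proofs are below) =====
def Claim_equal_number_converter : Prop := ∀ (temp : List String), Dom_number_converter temp → Pre_number_converter temp → Spec_number_converter temp (number_converter temp)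

-- ===== LEMMAS AND PROOFS =====

-- the fragment A's loop contributes for element x, in left-to-right order
def fA (x : String) : List String := (aStep x).1 :: (aStep x).2

theorem fA_quote : fA "\"" = ["\""] := by decide

theorem aLoop_eq (acc rest : List String) : aLoop acc rest = acc ++ rest.flatMap fA := by
  induction acc, rest using aLoop.induct with
  | case1 acc => simp [aLoop]
  | case2 acc x rs ih =>
    rw [aLoop, ih, List.flatMap_append, List.flatMap_cons]
    have hq : ((aStep x).2).flatMap fA = (aStep x).2 := by
      rcases aStep_cases x with ⟨hq, _⟩ | ⟨hq, _⟩ <;> rw [hq] <;> simp [fA_quote]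
    rw [hq]
    simp [fA]

-- pointwise: A's fragment reversed is exactly B's fragment, on nonempty elements
theorem fA_reverse_eq_bItem (x : String) (hx : x ≠ "") : (fA x).reverse = bItem x := by
  cases hcs : x.toList with
  | nil => exact absurd (by simpa using congrArg String.ofList hcs) hx
  | cons c cs =>
    have h0 := pyGet?_zero_cons x c cs hcs
    have hlen : PySem.Str.len x = (cs.length : Int) + 1 := by
      simp [PySem.Str.len, hcs]
    unfold fA bItem
    rw [h0]
    dsimp only
    by_cases hd : PySem.Chars.isdigit c = true
    · rw [if_pos hd]
      by_cases hl : PySem.Str.len x < 2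
      · rw [aStep_digit_pad x c h0 hd hl, if_pos (by omega)]; simp
      · rw [aStep_digit x c h0 hd hl, if_neg (by omega)]; simp
    · rw [if_neg (by simp_all)]
      by_cases hs : c = '+' ∨ c = '-'
      · rw [aStep_sign x c h0 (by simp_all) hs, if_pos hs]; simp
      · rw [aStep_other x c h0 (by simp_all) hs, if_neg hs]; simp

-- ===== VERDICT (by name: the statement is the Claim_ definition above) =====
theorem number_converter_spec : Claim_equal_number_converter := by
  intro temp hdom hpre
  unfold Spec_number_converter number_converter number_converter_alt
  rw [aLoop_eq, List.nil_append, List.reverse_flatMap,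
      PySem.List.foldl_append_eq_flatMap, List.nil_append]
  exact List.flatMap_congr fun x hx =>
    fA_reverse_eq_bItem x (hpre x (List.mem_reverse.mp hx))
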